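-- pv_equiv track=rewrite | github.com/alexm-nsk/cpps | src/utils/list_ports.py | get_names_and_ids
-- ===== SOURCE A (Python) =====
-- def get_names_and_ids(args):
--
--     names = []
--     ids = []
--     for index, arg in enumerate(args):
--         if arg == "--name":
--             for input_name in args[index + 1:]:
--                 if not input_name.startswith("--"):
--                     names.append(input_name)
--                 else:
--                     break
--
--         if arg == "--id":
--             for input_id in args[index + 1:]:
--                 if not input_id.startswith("--"):
--                     ids.append(input_id)
--                 else:
--                     break
--
--     return names, ids
-- ===== SOURCE B (Python) =====
-- def get_names_and_ids(args):
--     names = []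
--     ids = []
--     mode = None
--     for token in args:
--         if token == "--name":
--             mode = names
--         elif token == "--id":
--             mode = ids
--         elif token.startswith("--"):
--             mode = None
--         elif mode is not None:
--             mode.append(token)
--     return names, ids
-- ===== Notes on version B (the rewrite author's own statement) =====
-- stated objective: simpler
-- what changed: Replaced the nested scan (restarting an inner collection loop at every '--name'/'--id' occurrence) by a single forward pass that maintains a 'current target list' mode variable.
import Mathlib
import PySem

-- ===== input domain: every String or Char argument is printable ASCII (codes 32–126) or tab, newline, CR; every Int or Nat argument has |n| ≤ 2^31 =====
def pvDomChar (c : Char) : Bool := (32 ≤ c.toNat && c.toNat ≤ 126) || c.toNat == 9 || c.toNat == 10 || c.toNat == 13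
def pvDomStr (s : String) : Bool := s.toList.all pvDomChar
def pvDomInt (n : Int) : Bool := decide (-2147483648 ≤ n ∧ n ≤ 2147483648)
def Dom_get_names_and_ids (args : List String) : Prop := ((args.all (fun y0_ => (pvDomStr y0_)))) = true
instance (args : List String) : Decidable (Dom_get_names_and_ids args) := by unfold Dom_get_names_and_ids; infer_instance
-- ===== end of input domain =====

-- B replaces A's nested rescans with one pass keeping a current-target mode; return value only.
-- ===== PORT A =====
-- inner 'for input_name in args[index+1:] ... else break' loop: take tokens until one startswith "--"
def pvCollect (xs : List String) : List String :=
  match xs with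
  | [] => []
  | a :: rest => if PySem.Str.startswith a "--" then [] else a :: pvCollect rest

-- outer 'for index, arg in enumerate(args)' loop; the remaining suffix IS args[index+1:]
def pvGoA (rest names ids : List String) : List String × List String :=
  match rest with
  | [] => (names, ids)
  | arg :: rest =>
    let names := if arg == "--name" then names ++ pvCollect rest else names
    let ids := if arg == "--id" then ids ++ pvCollect rest else ids
    pvGoA rest names ids

def get_names_and_ids (args : List String) : List String × List String :=
  pvGoA args [] []

-- ===== PORT B =====
-- mode: none = no target, some true = names list, some false = ids list
def pvGoB (rest names ids : List String) (mode : Option Bool) : List String × List String :=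
  match rest with
  | [] => (names, ids)
  | token :: rest =>
    if token == "--name" then pvGoB rest names ids (some true)
    else if token == "--id" then pvGoB rest names ids (some false)
    else if PySem.Str.startswith token "--" then pvGoB rest names ids none
    else match mode with
      | some true => pvGoB rest (names ++ [token]) ids mode
      | some false => pvGoB rest names (ids ++ [token]) mode
      | none => pvGoB rest names ids mode

def get_names_and_ids_alt (args : List String) : List String × List String :=
  pvGoB args [] [] none

-- ===== PRECONDITION & SPEC =====
def Spec_get_names_and_ids (args : List String) (out : List String × List String) : Prop := out = get_names_and_ids_alt args
instance (args : List String) (out : List String × List String) : Decidable (Spec_get_names_and_ids args out) := by unfold Spec_get_names_and_ids; infer_instance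

-- ===== CLAIM (what is proved, stated in full; the proofs are below) =====
def Claim_equal_get_names_and_ids : Prop := ∀ (args : List String), Dom_get_names_and_ids args → Spec_get_names_and_ids args (get_names_and_ids args)

-- ===== LEMMAS AND PROOFS =====

lemma pvGoB_eq_pvGoA (rest : List String) : ∀ (names ids : List String) (mode : Option Bool),
    pvGoB rest names ids mode =
      pvGoA rest (if mode = some true then names ++ pvCollect rest else names)
                 (if mode = some false then ids ++ pvCollect rest else ids) := by
  induction rest with
  | nil => intro names ids mode; cases mode with
    | none => simp [pvGoB, pvGoA]
    | some b => cases b <;> simp [pvGoB, pvGoA, pvCollect]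
  | cons a rest ih =>
    intro names ids mode
    by_cases h1 : a = "--name"
    · subst h1
      have hs : PySem.Chars.startswith ['-','-','n','a','m','e'] ['-','-'] = true := by decide
      cases mode with
      | none => simp [pvGoB, pvGoA, ih]
      | some b => cases b <;> simp [pvGoB, pvGoA, ih, pvCollect, hs]
    · by_cases h2 : a = "--id"
      · subst h2
        have hs : PySem.Chars.startswith ['-','-','i','d'] ['-','-'] = true := by decide
        cases mode with
        | none => simp [pvGoB, pvGoA, ih]
        | some b => cases b <;> simp [pvGoB, pvGoA, ih, pvCollect, hs]
      · by_cases h3 : PySem.Chars.startswith a.toList ['-','-'] = true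
        · cases mode with
          | none => simp [pvGoB, pvGoA, ih, h1, h2, h3]
          | some b => cases b <;> simp [pvGoB, pvGoA, ih, pvCollect, h1, h2, h3]
        · cases mode with
          | none => simp [pvGoB, pvGoA, ih, h1, h2, h3]
          | some b => cases b <;> simp [pvGoB, pvGoA, ih, pvCollect, h1, h2, h3]

-- ===== VERDICT (by name: the statement is the Claim_ definition above) =====
theorem get_names_and_ids_spec : Claim_equal_get_names_and_ids := by
  intro args _
  unfold Spec_get_names_and_ids get_names_and_ids get_names_and_ids_alt
  simp [pvGoB_eq_pvGoA]
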